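-- pv_equiv track=rewrite | github.com/HappyPilot/Self_Gaming | multiagent/agents/reward_manager.py | _classify_kill
-- ===== SOURCE A (Python) =====
-- def _classify_kill(target: str) -> dict:
--     label = target.lower()
--     if any(key in label for key in ("sirus", "maven", "kitava", "elder", "shaper", "boss")):
--         enemy_class = "boss"
--     elif "unique" in label:
--         enemy_class = "boss"
--     elif any(key in label for key in ("rare", "magic", "metamorph", "harbinger")):
--         enemy_class = "elite"
--     else:
--         enemy_class = "normal"
--     return {"target": target, "class": enemy_class}
-- ===== SOURCE B (Python) =====
-- _BOSS = ("sirus", "maven", "kitava", "elder", "shaper", "boss", "unique")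
-- _ELITE = ("rare", "magic", "metamorph", "harbinger")
-- _CLASSES = ("boss", "elite", "normal")
--
-- def _classify_kill(target: str) -> dict:
--     label = target.lower()
--     best = 2  # rank: 0 = boss, 1 = elite, 2 = normal
--     for i in range(len(label)):
--         if label.startswith(_BOSS, i):
--             best = 0
--         elif best > 1 and label.startswith(_ELITE, i):
--             best = 1
--     return {"target": target, "class": _CLASSES[best]}
-- ===== Notes on version B (the rewrite author's own statement) =====
-- stated objective: alternative
-- what changed: Instead of A's if/elif chain of whole-string substring-membership tests, B makes a single left-to-right scan over the match positions of the lowered string, testing keyword prefixes (tuple startswith at each index) and keeping a minimum-rank accumulator that is finally mapped to a class name.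
import Mathlib
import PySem

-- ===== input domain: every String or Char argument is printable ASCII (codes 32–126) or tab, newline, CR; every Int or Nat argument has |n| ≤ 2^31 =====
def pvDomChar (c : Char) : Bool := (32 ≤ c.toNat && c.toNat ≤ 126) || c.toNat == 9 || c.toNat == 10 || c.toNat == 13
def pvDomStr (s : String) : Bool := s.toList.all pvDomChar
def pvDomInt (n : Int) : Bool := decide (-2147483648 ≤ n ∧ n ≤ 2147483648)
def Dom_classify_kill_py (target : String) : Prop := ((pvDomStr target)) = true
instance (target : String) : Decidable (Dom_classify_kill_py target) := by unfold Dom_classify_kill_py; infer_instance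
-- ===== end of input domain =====

-- B replaces the if/elif substring-membership chain by a single left-to-right scan over the
-- match positions of the lowered string, testing keyword prefixes at each position and keeping
-- a minimum-rank accumulator (alternative decomposition; same asymptotic cost).


-- ===== PORT A =====
def classify_kill_py (target : String) : List (String × String) :=
  let label := PySem.Str.lower target
  let enemy_class :=
    if ["sirus", "maven", "kitava", "elder", "shaper", "boss"].any
        (fun key => PySem.Str.isIn key label) then "boss"
    else if PySem.Str.isIn "unique" label then "boss"
    else if ["rare", "magic", "metamorph", "harbinger"].any
        (fun key => PySem.Str.isIn key label) then "elite"
    else "normal"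
  [("target", target), ("class", enemy_class)]

-- ===== PORT B =====
def pvBoss : List String := ["sirus", "maven", "kitava", "elder", "shaper", "boss", "unique"]
def pvElite : List String := ["rare", "magic", "metamorph", "harbinger"]
def pvClasses : List String := ["boss", "elite", "normal"]

-- Source B: one pass over the match positions of the lowered string. label.startswith(tuple, i)
-- is ported by hand as List.any of prefix tests on the i-th tail (Chars.startswith on drop):
-- exact here because i ranges over 0 ≤ i < len(label), where CPython's s.startswith(p, i)
-- is precisely 'p is a prefix of s[i:]'. best stays in {0,1,2}, so the final tuple indexing
-- _CLASSES[best] (ported with pyGet?) never hits the none case.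
def classify_kill_py_alt (target : String) : List (String × String) :=
  let label := PySem.Str.lower target
  let best : Nat :=
    (PySem.List.pyRange 0 (PySem.Str.len label : Int) 1).foldl
      (fun best i =>
        if pvBoss.any (fun k => PySem.Chars.startswith (label.toList.drop i.toNat) k.toList) then 0
        else if 1 < best ∧ pvElite.any (fun k => PySem.Chars.startswith (label.toList.drop i.toNat) k.toList) then 1
        else best)
      2
  [("target", target), ("class", (PySem.List.pyGet? pvClasses (best : Int)).getD "")]

-- ===== PRECONDITION & SPEC =====
def Spec_classify_kill_py (target : String) (out : List (String × String)) : Prop := out = classify_kill_py_alt target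
instance (target : String) (out : List (String × String)) : Decidable (Spec_classify_kill_py target out) := by unfold Spec_classify_kill_py; infer_instance

-- ===== CLAIM (what is proved, stated in full; the proofs are below) =====
def Claim_equal_classify_kill_py : Prop := ∀ (target : String), Dom_classify_kill_py target → Spec_classify_kill_py target (classify_kill_py target)

-- ===== LEMMAS AND PROOFS =====

-- does any keyword of `keys` start at position j of cs?
def pvM (keys : List String) (cs : List Char) (j : Nat) : Bool :=
  keys.any (fun k => PySem.Chars.startswith (cs.drop j) k.toList)

-- characterization of the scan fold over any list of positions
theorem pv_scan_char (cs : List Char) (L : List Nat) : ∀ (b : Nat),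
    L.foldl (fun b j =>
      if pvM pvBoss cs j then 0
      else if 1 < b ∧ pvM pvElite cs j then 1 else b) b
    = if L.any (pvM pvBoss cs) then 0
      else if b ≤ 1 then b
      else if L.any (pvM pvElite cs) then 1 else b := by
  induction L with
  | nil => intro b; simp
  | cons i L ih =>
    intro b
    simp only [List.foldl_cons, List.any_cons, Bool.or_eq_true, ih]
    by_cases hm0 : pvM pvBoss cs i = true
    all_goals by_cases hm1 : pvM pvElite cs i = true
    all_goals simp [hm0, hm1]
    all_goals split_ifs <;> omega

-- a nonempty keyword occurs at some position < length iff it is a substring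
theorem pv_key_scan (k cs : List Char) (hk : k ≠ []) :
    (∃ j, j < cs.length ∧ k <+: cs.drop j) ↔ PySem.Chars.isIn k cs = true := by
  rw [← PySem.Chars.exists_prefix_drop_iff_isIn]
  constructor
  · rintro ⟨j, _, hp⟩; exact ⟨j, hp⟩
  · rintro ⟨j, hp⟩
    by_cases hj : j < cs.length
    · exact ⟨j, hj, hp⟩
    · exfalso
      have : cs.drop j = [] := List.drop_eq_nil_of_le (by omega)
      rw [this] at hp
      exact hk (List.prefix_nil.mp hp)

-- any position matches some key of `keys` ↔ some key of `keys` is a substring (nonempty keys)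
theorem pv_any_range (keys : List String) (cs : List Char)
    (hk : ∀ k ∈ keys, k.toList ≠ []) :
    (List.range cs.length).any (pvM keys cs)
      = keys.any (fun k => PySem.Chars.isIn k.toList cs) := by
  rcases h : keys.any (fun k => PySem.Chars.isIn k.toList cs) with _ | _
  · simp only [List.any_eq_false] at h ⊢
    intro j hj
    simp only [pvM, List.any_eq_true, not_exists, not_and]
    intro k hkmem hsw
    have hpre : k.toList <+: cs.drop j := (PySem.Chars.startswith_iff _ _).mp hsw
    have : PySem.Chars.isIn k.toList cs = true :=
      (pv_key_scan _ _ (hk k hkmem)).mp ⟨j, by simpa using hj, hpre⟩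
    exact absurd this (by simpa using h k hkmem)
  · simp only [List.any_eq_true] at h ⊢
    obtain ⟨k, hkmem, hin⟩ := h
    obtain ⟨j, hj, hpre⟩ := (pv_key_scan _ _ (hk k hkmem)).mpr hin
    exact ⟨j, by simpa using hj, by
      simp only [pvM, List.any_eq_true]
      exact ⟨k, hkmem, (PySem.Chars.startswith_iff _ _).mpr hpre⟩⟩

-- ===== VERDICT (by name: the statement is the Claim_ definition above) =====
theorem classify_kill_py_spec : Claim_equal_classify_kill_py := by
  intro target _
  unfold Spec_classify_kill_py
  simp only [classify_kill_py, classify_kill_py_alt]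
  set s := PySem.Str.lower target with hs
  set cs := s.toList with hcs
  have hfold :
      (PySem.List.pyRange 0 (PySem.Str.len s : Int) 1).foldl
        (fun best i =>
          if pvBoss.any (fun k => PySem.Chars.startswith (s.toList.drop i.toNat) k.toList) then 0
          else if 1 < best ∧ pvElite.any (fun k => PySem.Chars.startswith (s.toList.drop i.toNat) k.toList) then 1
          else best) 2
      = (List.range cs.length).foldl
        (fun b j => if pvM pvBoss cs j then 0
          else if 1 < b ∧ pvM pvElite cs j then 1 else b) 2 := by
    rw [PySem.List.pyRange_one]
    rw [List.foldl_map]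
    have hlen : ((PySem.Str.len s : Int) - 0).toNat = cs.length := by
      simp [PySem.Str.len, hcs]
    rw [hlen]
    apply PySem.List.foldl_congr_mem
    intro acc x _
    simp [pvM, hcs]
  rw [hfold, pv_scan_char cs,
      pv_any_range pvBoss cs (by decide), pv_any_range pvElite cs (by decide)]
  have hsplit : pvBoss = ["sirus", "maven", "kitava", "elder", "shaper", "boss"] ++ ["unique"] := rfl
  rw [hsplit, List.any_append]
  simp only [PySem.Str.isIn_eq, hcs, Bool.or_eq_true, List.any_eq_true]
  by_cases h6 : ∃ k ∈ ["sirus", "maven", "kitava", "elder", "shaper", "boss"],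
      PySem.Chars.isIn k.toList cs = true <;>
  by_cases hu : ∃ k ∈ ["unique"], PySem.Chars.isIn k.toList cs = true <;>
  by_cases he : ∃ k ∈ pvElite, PySem.Chars.isIn k.toList cs = true <;>
  simp_all [pvElite, pvClasses, PySem.List.pyGet?, PySem.List.pyIdx?]
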